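-- pv_equiv track=rewrite | github.com/mdrichar/yz | main.py | buildWorkloads
-- ===== SOURCE A (Python) =====
-- def buildWorkloads(itemsPerBlock, blocksPerWave, supplyIterable):
--     totalWorkload = []
--     currentWave = []
--     currentBlock = []
--     for turnsUsedTuple, _ in supplyIterable:
--         currentBlock.append(turnsUsedTuple)
--
--         #Check if current block is full
--         if len(currentBlock) == itemsPerBlock:
--             # Add the current block to the current Wave
--             currentWave.append(currentBlock)
--
--             if len(currentWave) == blocksPerWave:
--                 totalWorkload.append(currentWave)
--                 # Start a new wave
--                 currentWave = []
--             # Start a new block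
--             currentBlock = []
--     if currentBlock:
--         currentWave.append(currentBlock)
--         while len(currentWave) < blocksPerWave:
--             currentWave.append([])
--
--     if currentWave:
--         totalWorkload.append(currentWave)
--
--     return totalWorkload
-- ===== SOURCE B (Python) =====
-- def _chunk(xs, k):
--     """Split xs into successive full chunks of size k; return (chunks, leftover)."""
--     out = []
--     while 0 < k <= len(xs):
--         out.append(xs[:k])
--         xs = xs[k:]
--     return out, xs
--
--
-- def buildWorkloads(itemsPerBlock, blocksPerWave, supplyIterable):
--     items = [t for t, _ in supplyIterable]
--     blocks, rest = _chunk(items, itemsPerBlock)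
--     waves, tail = _chunk(blocks, blocksPerWave)
--     if rest:
--         tail = tail + [rest]
--         tail = tail + [[]] * (blocksPerWave - len(tail))
--     if tail:
--         waves = waves + [tail]
--     return waves
-- ===== Notes on version B (the rewrite author's own statement) =====
-- stated objective: simpler
-- what changed: Replaces A's single-pass state machine with three simultaneous accumulators by two successive chunking passes of one reusable helper (items into blocks, blocks into waves) followed by explicit tail padding.
import Mathlib
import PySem

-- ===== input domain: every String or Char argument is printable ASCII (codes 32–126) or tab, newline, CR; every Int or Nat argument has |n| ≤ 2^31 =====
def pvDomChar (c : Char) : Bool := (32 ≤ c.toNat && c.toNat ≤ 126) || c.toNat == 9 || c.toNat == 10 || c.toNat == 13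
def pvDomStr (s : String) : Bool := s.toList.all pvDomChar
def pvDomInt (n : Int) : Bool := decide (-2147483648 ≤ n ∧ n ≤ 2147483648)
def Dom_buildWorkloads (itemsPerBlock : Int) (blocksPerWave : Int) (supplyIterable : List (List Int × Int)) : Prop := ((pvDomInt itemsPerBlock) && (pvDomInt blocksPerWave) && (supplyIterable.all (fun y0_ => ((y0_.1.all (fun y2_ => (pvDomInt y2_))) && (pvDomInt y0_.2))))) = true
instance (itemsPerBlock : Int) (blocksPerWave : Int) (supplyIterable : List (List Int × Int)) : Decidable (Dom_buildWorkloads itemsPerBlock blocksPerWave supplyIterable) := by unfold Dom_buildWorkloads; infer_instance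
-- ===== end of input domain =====

-- B replaces A's one-pass three-level accumulator state machine by two successive
-- chunking passes (items→blocks, blocks→waves) plus explicit tail padding; objective: simpler.

-- ===== PORT A =====
-- loop body of A's `for turnsUsedTuple, _ in supplyIterable`, state (totalWorkload, currentWave, currentBlock)
def stepA (itemsPerBlock blocksPerWave : Int)
    (st : List (List (List (List Int))) × List (List (List Int)) × List (List Int))
    (p : List Int × Int) :
    List (List (List (List Int))) × List (List (List Int)) × List (List Int) :=
  let B := st.2.2 ++ [p.1]
  if (B.length : Int) = itemsPerBlock then
    let W := st.2.1 ++ [B]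
    if (W.length : Int) = blocksPerWave then (st.1 ++ [W], [], [])
    else (st.1, W, [])
  else (st.1, st.2.1, B)

-- A's trailing `while len(currentWave) < blocksPerWave: currentWave.append([])`
def padWave (blocksPerWave : Int) (w : List (List (List Int))) : List (List (List Int)) :=
  if (w.length : Int) < blocksPerWave then padWave blocksPerWave (w ++ [[]])
  else w
termination_by (blocksPerWave - w.length).toNat
decreasing_by simp_all; omega

-- A's code after the loop: flush the partial block (padding the wave) and the partial wave
def finalA (blocksPerWave : Int)
    (st : List (List (List (List Int))) × List (List (List Int)) × List (List Int)) :
    List (List (List (List Int))) :=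
  let W := if st.2.2 ≠ [] then padWave blocksPerWave (st.2.1 ++ [st.2.2]) else st.2.1
  if W ≠ [] then st.1 ++ [W] else st.1

def buildWorkloads (itemsPerBlock : Int) (blocksPerWave : Int) (supplyIterable : List (List Int × Int)) : List (List (List (List Int))) :=
  finalA blocksPerWave (supplyIterable.foldl (stepA itemsPerBlock blocksPerWave) ([], [], []))

-- ===== PORT B =====
-- Source B's `_chunk`: the `while 0 < k <= len(xs)` loop as structural recursion
def pyChunk {α : Type} (k : Int) (xs : List α) : List (List α) × List α :=
  if h : 0 < k ∧ k ≤ (xs.length : Int) then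
    let r := pyChunk k (xs.drop k.toNat)
    (xs.take k.toNat :: r.1, r.2)
  else ([], xs)
termination_by xs.length
decreasing_by simp; omega

def buildWorkloads_alt (itemsPerBlock : Int) (blocksPerWave : Int) (supplyIterable : List (List Int × Int)) : List (List (List (List Int))) :=
  let items := supplyIterable.map (·.1)
  let br := pyChunk itemsPerBlock items
  let wt := pyChunk blocksPerWave br.1
  let tail := if br.2 ≠ [] then
      let t := wt.2 ++ [br.2]
      t ++ List.replicate (blocksPerWave - (t.length : Int)).toNat []
    else wt.2
  if tail ≠ [] then wt.1 ++ [tail] else wt.1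

-- ===== PRECONDITION & SPEC =====
def Spec_buildWorkloads (itemsPerBlock : Int) (blocksPerWave : Int) (supplyIterable : List (List Int × Int)) (out : List (List (List (List Int)))) : Prop := out = buildWorkloads_alt itemsPerBlock blocksPerWave supplyIterable
instance (itemsPerBlock : Int) (blocksPerWave : Int) (supplyIterable : List (List Int × Int)) (out : List (List (List (List Int)))) : Decidable (Spec_buildWorkloads itemsPerBlock blocksPerWave supplyIterable out) := by unfold Spec_buildWorkloads; infer_instance

-- ===== CLAIM (what is proved, stated in full; the proofs are below) =====
def Claim_equal_buildWorkloads : Prop := ∀ (itemsPerBlock : Int) (blocksPerWave : Int) (supplyIterable : List (List Int × Int)), Dom_buildWorkloads itemsPerBlock blocksPerWave supplyIterable → Spec_buildWorkloads itemsPerBlock blocksPerWave supplyIterable (buildWorkloads itemsPerBlock blocksPerWave supplyIterable)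

-- ===== LEMMAS AND PROOFS =====

-- generalisation of buildWorkloads_alt's body: a pending partial wave W in front of the blocks
def asm (itemsPerBlock blocksPerWave : Int) (W : List (List (List Int))) (ys : List (List Int)) : List (List (List (List Int))) :=
  let br := pyChunk itemsPerBlock ys
  let wt := pyChunk blocksPerWave (W ++ br.1)
  let tail := if br.2 ≠ [] then
      let t := wt.2 ++ [br.2]
      t ++ List.replicate (blocksPerWave - (t.length : Int)).toNat []
    else wt.2
  if tail ≠ [] then wt.1 ++ [tail] else wt.1

lemma alt_eq_asm (ipb bpw : Int) (s : List (List Int × Int)) :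
    buildWorkloads_alt ipb bpw s = asm ipb bpw [] (s.map (·.1)) := by
  simp [buildWorkloads_alt, asm]

lemma padWave_eq (bpw : Int) (w : List (List (List Int))) :
    padWave bpw w = w ++ List.replicate (bpw - w.length).toNat [] := by
  fun_induction padWave bpw w with
  | case1 w h ih =>
      rw [ih]
      have : (bpw - (w.length : Int)).toNat = ((bpw - ((w ++ [[]]).length : Int)).toNat) + 1 := by
        simp; omega
      rw [this, List.replicate_succ]
      simp
  | case2 w h =>
      have : (bpw - (w.length : Int)).toNat = 0 := by omega
      simp [this]

lemma pyChunk_small {α : Type} (k : Int) (xs : List α) (h : k ≤ 0 ∨ (xs.length : Int) < k) :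
    pyChunk k xs = ([], xs) := by
  rw [pyChunk]
  rw [dif_neg]
  omega

lemma pyChunk_full {α : Type} (k : Int) (b xs : List α) (hb : (b.length : Int) = k) (hb0 : b ≠ []) :
    pyChunk k (b ++ xs) = (b :: (pyChunk k xs).1, (pyChunk k xs).2) := by
  have hk : 0 < k := by
    have : 0 < b.length := List.length_pos_iff.mpr hb0
    omega
  have hkn : k.toNat = b.length := by omega
  rw [pyChunk]
  rw [dif_pos (by simp; omega)]
  simp [hkn, List.take_append_of_le_length, List.drop_append_of_le_length]

lemma asm_shift (ipb bpw : Int) (W : List (List (List Int))) (Bf : List (List Int))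
    (xs : List (List Int)) (hBf : (Bf.length : Int) = ipb) (hB0 : Bf ≠ []) :
    asm ipb bpw W (Bf ++ xs) = asm ipb bpw (W ++ [Bf]) xs := by
  simp only [asm]
  rw [pyChunk_full _ _ _ hBf hB0,
    show W ++ Bf :: (pyChunk ipb xs).1 = (W ++ [Bf]) ++ (pyChunk ipb xs).1 from by simp]

lemma asm_flush (ipb bpw : Int) (W : List (List (List Int))) (Bf : List (List Int))
    (xs : List (List Int)) (hBf : (Bf.length : Int) = ipb)
    (hB0 : Bf ≠ []) (hW : ((W ++ [Bf]).length : Int) = bpw) :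
    asm ipb bpw W (Bf ++ xs) = (W ++ [Bf]) :: asm ipb bpw [] xs := by
  simp only [asm, List.nil_append]
  rw [pyChunk_full _ _ _ hBf hB0,
    show W ++ Bf :: (pyChunk ipb xs).1 = (W ++ [Bf]) ++ (pyChunk ipb xs).1 from by simp,
    pyChunk_full _ _ _ hW (by simp)]
  split <;> simp
  split <;> simp

-- main invariant: running A's loop from state (T, W, B) with B not yet full and W not yet full
lemma foldA_asm (ipb bpw : Int) :
    ∀ (xs : List (List Int × Int)) (T : List (List (List (List Int))))
      (W : List (List (List Int))) (B : List (List Int)),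
      ((B.length : Int) < ipb ∨ ipb ≤ 0) → ((W.length : Int) < bpw ∨ bpw ≤ 0) →
      finalA bpw (xs.foldl (stepA ipb bpw) (T, W, B)) = T ++ asm ipb bpw W (B ++ xs.map (·.1)) := by
  intro xs
  induction xs with
  | nil =>
      intro T W B hB hW
      have h1 : pyChunk ipb B = ([], B) := pyChunk_small _ _ (by omega)
      have h2 : pyChunk bpw W = ([], W) := pyChunk_small _ _ (by omega)
      simp only [List.foldl_nil, List.map_nil, List.append_nil, asm, h1, List.append_nil, h2,
        finalA]
      by_cases hBe : B = []
      · simp [hBe]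
        by_cases hWe : W = [] <;> simp [hWe]
      · simp only [hBe, if_pos, ne_eq, not_false_iff]
        rw [padWave_eq]
        simp [hBe]
  | cons p xs ih =>
      intro T W B hB hW
      simp only [List.foldl_cons, List.map_cons]
      have hassoc : B ++ p.1 :: xs.map (·.1) = (B ++ [p.1]) ++ xs.map (·.1) := by simp
      by_cases hfull : ((B ++ [p.1]).length : Int) = ipb
      · have hfull' : (B.length : Int) + 1 = ipb := by simpa using hfull
        by_cases hwave : ((W ++ [B ++ [p.1]]).length : Int) = bpw
        · -- block full, wave full: flush both
          have hwave' : (W.length : Int) + 1 = bpw := by simpa using hwave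
          have hstep : stepA ipb bpw (T, W, B) p = (T ++ [W ++ [B ++ [p.1]]], [], []) := by
            simp [stepA, hfull', hwave']
          rw [hstep, ih _ _ _ (by simp; omega) (by simp; omega), hassoc,
            asm_flush ipb bpw W (B ++ [p.1]) _ hfull (by simp) hwave]
          simp
        · -- block full, wave not yet full
          have hwave' : ¬((W.length : Int) + 1 = bpw) := by simpa using hwave
          have hstep : stepA ipb bpw (T, W, B) p = (T, W ++ [B ++ [p.1]], []) := by
            simp [stepA, hfull', hwave']
          have hW' : ((( W ++ [B ++ [p.1]]).length : Int) < bpw ∨ bpw ≤ 0) := by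
            simp; omega
          rw [hstep, ih _ _ _ (by simp; omega) hW', hassoc,
            asm_shift ipb bpw W (B ++ [p.1]) _ hfull (by simp)]
          simp
      · -- block not yet full
        have hfull' : ¬((B.length : Int) + 1 = ipb) := by simpa using hfull
        have hstep : stepA ipb bpw (T, W, B) p = (T, W, B ++ [p.1]) := by
          simp [stepA, hfull']
        have hB' : (((B ++ [p.1]).length : Int) < ipb ∨ ipb ≤ 0) := by
          simp; omega
        rw [hstep, ih _ _ _ hB' hW, hassoc]

-- ===== VERDICT (by name: the statement is the Claim_ definition above) =====
theorem buildWorkloads_spec : Claim_equal_buildWorkloads := by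
  intro ipb bpw s _
  unfold Spec_buildWorkloads buildWorkloads
  rw [alt_eq_asm]
  have := foldA_asm ipb bpw s [] [] [] (by simp; omega) (by simp; omega)
  simpa using this
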